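-- pv_equiv track=rewrite | github.com/OxQuasar/nous-memories | iching/i-summary/work/c1c2_nuclear_rank.py | build_nuclear_matrix
-- ===== SOURCE A (Python) =====
-- def build_nuclear_matrix(n):
--     """
--     Build the 2n×2n nuclear extraction matrix M over F₂.
--
--     For a 2n-line figure h = (L₁, ..., L_{2n}):
--       nuclear_lower = (L₂, L₃, ..., L_{n+1})    [n lines]
--       nuclear_upper = (L_n, L_{n+1}, ..., L_{2n-1})  [n lines]
--
--     Output: 2n-line figure with lower = nuclear_lower, upper = nuclear_upper.
--
--     In bit indexing (0-based): L_i = bit i of h.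
--     L₁ = bit 0, L₂ = bit 1, ..., L_{2n} = bit 2n-1.
--
--     nuclear_lower[j] = L_{j+2} for j=0,...,n-1  → bit j+1 of input
--     nuclear_upper[j] = L_{j+n} for j=0,...,n-1  → bit j+n-1 of input
--
--     Output bit layout: lower = bits 0..n-1, upper = bits n..2n-1
--     output_bit_k = nuclear_lower[k] = input_bit_{k+1}  for k=0,...,n-1
--     output_bit_{n+k} = nuclear_upper[k] = input_bit_{k+n-1}  for k=0,...,n-1
--     """
--     dim = 2 * n
--     M = [[0]*dim for _ in range(dim)]
--
--     for k in range(n):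
--         # Lower: output bit k ← input bit (k+1)
--         input_bit = k + 1
--         if 0 <= input_bit < dim:
--             M[k][input_bit] = 1
--
--         # Upper: output bit (n+k) ← input bit (k + n - 1)
--         input_bit = k + n - 1
--         if 0 <= input_bit < dim:
--             M[n + k][input_bit] = 1
--
--     return M
-- ===== SOURCE B (Python) =====
-- def build_nuclear_matrix(n):
--     dim = 2 * n
--     identity = [[0] * i + [1] + [0] * (dim - 1 - i) for i in range(dim)]
--     return identity[1:n+1] + identity[n-1:2*n-1]
-- ===== Notes on version B (the rewrite author's own statement) =====
-- stated objective: alternative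
-- what changed: Instead of allocating a 2n x 2n zero matrix and writing two entries per loop index k with range guards, B builds the 2n x 2n identity matrix once and returns the concatenation of its row slices identity[1:n+1] and identity[n-1:2n-1], since the output's lower block is the identity rows e_1..e_n and its upper block is e_{n-1}..e_{2n-2}.
import Mathlib
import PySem

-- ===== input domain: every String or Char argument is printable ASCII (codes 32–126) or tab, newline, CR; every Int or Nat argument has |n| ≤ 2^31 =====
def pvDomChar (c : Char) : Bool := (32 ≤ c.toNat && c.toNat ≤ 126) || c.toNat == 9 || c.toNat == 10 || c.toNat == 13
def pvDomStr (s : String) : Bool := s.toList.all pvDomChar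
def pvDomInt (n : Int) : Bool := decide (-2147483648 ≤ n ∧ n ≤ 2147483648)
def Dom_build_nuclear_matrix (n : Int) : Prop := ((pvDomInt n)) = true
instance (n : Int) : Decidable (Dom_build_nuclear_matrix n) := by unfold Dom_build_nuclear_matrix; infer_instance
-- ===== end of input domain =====

-- B builds the 2n×2n identity once and returns the concatenation of its row slices
-- identity[1:n+1] ++ identity[n-1:2n-1], instead of A's zero matrix plus two guarded
-- writes per loop index; objective: alternative decomposition.

-- ===== PORT A =====
def build_nuclear_matrix (n : Int) : List (List Int) :=
  let dim := 2 * n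
  let M := List.replicate dim.toNat (List.replicate dim.toNat (0 : Int))
  (PySem.List.pyRange 0 n 1).foldl (fun M k =>
    -- Lower: output bit k ← input bit (k+1)
    let input_bit := k + 1
    let M := if 0 ≤ input_bit ∧ input_bit < dim then
        M.set k.toNat ((M.getD k.toNat []).set input_bit.toNat 1)
      else M
    -- Upper: output bit (n+k) ← input bit (k + n - 1)
    let input_bit := k + n - 1
    if 0 ≤ input_bit ∧ input_bit < dim then
      M.set (n + k).toNat ((M.getD (n + k).toNat []).set input_bit.toNat 1)
    else M) M

-- ===== PORT B =====
def build_nuclear_matrix_alt (n : Int) : List (List Int) :=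
  let dim := 2 * n
  let identity := (PySem.List.pyRange 0 dim 1).map (fun i =>
    List.replicate i.toNat (0 : Int) ++ [1] ++ List.replicate (dim - 1 - i).toNat 0)
  PySem.List.slice identity (some 1) (some (n + 1)) ++
    PySem.List.slice identity (some (n - 1)) (some (2 * n - 1))

-- ===== PRECONDITION & SPEC =====
def Spec_build_nuclear_matrix (n : Int) (out : List (List Int)) : Prop := out = build_nuclear_matrix_alt n
instance (n : Int) (out : List (List Int)) : Decidable (Spec_build_nuclear_matrix n out) := by unfold Spec_build_nuclear_matrix; infer_instance

-- ===== CLAIM (what is proved, stated in full; the proofs are below) =====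
def Claim_equal_build_nuclear_matrix : Prop := ∀ (n : Int), Dom_build_nuclear_matrix n → Spec_build_nuclear_matrix n (build_nuclear_matrix n)

-- ===== LEMMAS AND PROOFS =====

-- the one-hot row that ends up at row index r (Nat view, for n = ↑m)
def pvOhot (m r : Nat) : List Int :=
  (List.replicate (2 * m) (0 : Int)).set (if r < m then r + 1 else r - 1) 1

-- A's matrix after processing loop indices 0..j-1: rows < j and rows m..m+j-1 are done
def pvInv (m j : Nat) : List (List Int) :=
  (List.range (2 * m)).map (fun r =>
    if r < j ∨ (m ≤ r ∧ r < m + j) then pvOhot m r else List.replicate (2 * m) (0 : Int))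

theorem pv_map_range_set {α : Type} (f : Nat → α) (N r : Nat) (v : α) :
    ((List.range N).map f).set r v
      = (List.range N).map (fun i => if r = i then v else f i) := by
  apply List.ext_getElem
  · simp
  · intro i h1 h2
    simp only [List.getElem_set, List.getElem_map, List.getElem_range]

theorem pv_getD_map_range {α : Type} (f : Nat → α) (N r : Nat) (d : α) (h : r < N) :
    ((List.range N).map f).getD r d = f r := by
  rw [List.getD_eq_getElem _ _ (by simpa using h)]
  simp

theorem pv_inv_zero (m : Nat) :
    pvInv m 0 = List.replicate (2 * m) (List.replicate (2 * m) (0 : Int)) := by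
  unfold pvInv
  rw [show (fun r => if r < 0 ∨ (m ≤ r ∧ r < m + 0) then pvOhot m r
        else List.replicate (2 * m) (0 : Int))
      = Function.const Nat (List.replicate (2 * m) (0 : Int)) from ?_, List.map_const,
    List.length_range]
  funext r
  simp only [Function.const]
  rw [if_neg (by omega)]

theorem pv_inv_step (m j : Nat) (hm : 1 ≤ m) (hj : j < m) :
    ((pvInv m j).set j ((( pvInv m j).getD j []).set (j + 1) 1)).set (m + j)
        ((((pvInv m j).set j (((pvInv m j).getD j []).set (j + 1) 1)).getD (m + j) []).set
          (j + m - 1) 1)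
      = pvInv m (j + 1) := by
  have hj2 : j < 2 * m := by omega
  have hmj2 : m + j < 2 * m := by omega
  unfold pvInv
  rw [pv_getD_map_range _ _ _ _ hj2]
  rw [if_neg (by omega)]
  have hrow : (List.replicate (2 * m) (0 : Int)).set (j + 1) 1 = pvOhot m j := by
    unfold pvOhot; rw [if_pos hj]
  rw [hrow, pv_map_range_set]
  rw [pv_getD_map_range _ _ _ _ hmj2]
  rw [if_neg (by omega), if_neg (by omega)]
  have hrow2 : (List.replicate (2 * m) (0 : Int)).set (j + m - 1) 1 = pvOhot m (m + j) := by
    unfold pvOhot; rw [if_neg (by omega)]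
    congr 1; omega
  rw [hrow2, pv_map_range_set]
  apply List.map_congr_left
  intro r hr
  rw [List.mem_range] at hr
  by_cases h1 : j = r
  · subst h1; rw [if_neg (by omega), if_pos (by omega), if_pos (by omega)]
  · by_cases h2 : m + j = r
    · subst h2; rw [if_pos rfl, if_pos (by omega)]
    · rw [if_neg h2, if_neg h1]
      by_cases h3 : r < j ∨ (m ≤ r ∧ r < m + j)
      · rw [if_pos h3, if_pos (by omega)]
      · rw [if_neg h3, if_neg (by omega)]

theorem pv_foldA (m : Nat) (hm : 1 ≤ m) (j : Nat) (hj : j ≤ m) :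
    (((List.range j).map (Nat.cast : Nat → Int)).foldl (fun (M : List (List Int)) (k : Int) =>
      let input_bit := k + 1
      let M := if 0 ≤ input_bit ∧ input_bit < 2 * (m : Int) then
          M.set k.toNat ((M.getD k.toNat []).set input_bit.toNat 1)
        else M
      let input_bit := k + (m : Int) - 1
      if 0 ≤ input_bit ∧ input_bit < 2 * (m : Int) then
        M.set ((m : Int) + k).toNat ((M.getD ((m : Int) + k).toNat []).set input_bit.toNat 1)
      else M) (pvInv m 0))
    = pvInv m j := by
  induction j with
  | zero => simp
  | succ i ih =>
    rw [List.range_succ]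
    simp only [List.map_append, List.map_cons, List.map_nil, List.foldl_append,
      List.foldl_cons, List.foldl_nil]
    rw [ih (by omega)]
    rw [if_pos (⟨by omega, by omega⟩ : (0:Int) ≤ (i:Int) + 1 ∧ (i:Int) + 1 < 2 * (m:Int))]
    rw [if_pos (⟨by omega, by omega⟩ :
      (0:Int) ≤ (i:Int) + (m:Int) - 1 ∧ (i:Int) + (m:Int) - 1 < 2 * (m:Int))]
    rw [show ((i:Int) + 1).toNat = i + 1 by omega, show ((i:Int)).toNat = i by omega,
      show ((m:Int) + (i:Int)).toNat = m + i by omega,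
      show ((i:Int) + (m:Int) - 1).toNat = i + m - 1 by omega]
    exact pv_inv_step m i hm (by omega)

theorem pv_A_eq (m : Nat) (hm : 1 ≤ m) :
    build_nuclear_matrix (m : Int) = pvInv m m := by
  unfold build_nuclear_matrix
  simp only []
  rw [PySem.List.pyRange_zero_natCast m]
  have hdim : ((2 * (m : Int))).toNat = 2 * m := by omega
  rw [hdim, ← pv_inv_zero m]
  exact pv_foldA m hm m (le_refl m)

theorem pv_inv_full (m : Nat) : pvInv m m = (List.range (2 * m)).map (pvOhot m) := by
  unfold pvInv
  apply List.map_congr_left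
  intro r hr
  rw [List.mem_range] at hr
  rw [if_pos (by omega)]

-- B's identity row i (Nat view)
def pvE (N i : Nat) : List Int := List.replicate i (0 : Int) ++ [1] ++ List.replicate (N - 1 - i) 0

theorem pv_e_eq (N c : Nat) (h : c < N) :
    pvE N c = (List.replicate N (0 : Int)).set c 1 := by
  unfold pvE
  apply List.ext_getElem
  · simp; omega
  · intro i h1 h2
    simp only [List.getElem_append, List.length_append, List.length_replicate,
      List.getElem_replicate, List.getElem_set, List.length_cons, List.length_nil]
    split_ifs <;> first | rfl | omega | (simp_all; try omega)

theorem pv_B_eq (m : Nat) (hm : 1 ≤ m) :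
    build_nuclear_matrix_alt (m : Int) = (List.range (2 * m)).map (pvOhot m) := by
  unfold build_nuclear_matrix_alt
  simp only []
  rw [show (2 : Int) * (m : Int) = ((2 * m : Nat) : Int) by push_cast; ring,
    PySem.List.pyRange_zero_natCast (2 * m), List.map_map]
  have hI : ((List.range (2 * m)).map
      ((fun i => List.replicate i.toNat (0 : Int) ++ [1] ++
          List.replicate (((2 * m : Nat) : Int) - 1 - i).toNat 0) ∘ (Nat.cast : Nat → Int)))
      = (List.range (2 * m)).map (pvE (2 * m)) := by
    apply List.map_congr_left
    intro i hi
    rw [List.mem_range] at hi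
    simp only [Function.comp, pvE]
    rw [show ((i : Int)).toNat = i by omega,
      show ((((2 * m : Nat)) : Int) - 1 - (i : Int)).toNat = 2 * m - 1 - i by omega]
  rw [hI]
  rw [show ((m : Int) - 1) = (((m - 1 : Nat)) : Int) by omega,
    show ((((2 * m : Nat)) : Int) - 1) = (((2 * m - 1 : Nat)) : Int) by push_cast; ring_nf; omega,
    show ((m : Int) + 1) = (((m + 1 : Nat)) : Int) by push_cast; ring,
    show (1 : Int) = ((1 : Nat) : Int) by norm_num,
    PySem.List.slice_natCast, PySem.List.slice_natCast]
  rw [← List.map_drop, ← List.map_take, ← List.map_drop, ← List.map_take]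
  apply List.ext_getElem
  · simp; omega
  · intro i h1 h2
    rw [List.length_append] at h1
    simp only [List.length_map, List.length_take, List.length_drop, List.length_range] at h1
    by_cases hi : i < m
    · rw [List.getElem_append_left (by simp; omega)]
      simp only [List.getElem_map, List.getElem_take, List.getElem_drop, List.getElem_range]
      rw [pv_e_eq (2*m) (1 + i) (by omega)]
      unfold pvOhot
      rw [if_pos hi]
      congr 1; omega
    · rw [List.getElem_append_right (by simp; omega)]
      simp only [List.length_map, List.length_take, List.length_drop, List.length_range,
        List.getElem_map, List.getElem_take, List.getElem_drop, List.getElem_range]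
      have hlen : min (m + 1 - 1) (2 * m - 1) = m := by omega
      rw [hlen, pv_e_eq (2*m) _ (by omega)]
      unfold pvOhot
      rw [if_neg (by omega)]
      congr 1; omega

theorem pv_nonpos (n : Int) (hn : n ≤ 0) :
    build_nuclear_matrix n = [] ∧ build_nuclear_matrix_alt n = [] := by
  constructor
  · unfold build_nuclear_matrix
    simp only []
    rw [PySem.List.pyRange_one_eq_nil hn]
    simp
    omega
  · unfold build_nuclear_matrix_alt
    simp only []
    rw [PySem.List.pyRange_one_eq_nil (by omega : 2 * n ≤ 0)]
    simp [PySem.List.slice]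

-- ===== VERDICT (by name: the statement is the Claim_ definition above) =====
theorem build_nuclear_matrix_spec : Claim_equal_build_nuclear_matrix := by
  intro n _
  unfold Spec_build_nuclear_matrix
  by_cases hn : n ≤ 0
  · obtain ⟨hA, hB⟩ := pv_nonpos n hn
    rw [hA, hB]
  · have hm : 1 ≤ n.toNat := by omega
    have hcast : n = (n.toNat : Int) := by omega
    rw [hcast, pv_A_eq n.toNat hm, pv_B_eq n.toNat hm, pv_inv_full n.toNat]
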